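-- pv_equiv track=rewrite | github.com/jsmcel/androidfutbol5 | tools/apply_players_patch.py | role_group_code
-- ===== SOURCE A (Python) =====
-- def role_group_code(position_text: str) -> int:
--     p = (position_text or "").lower()
--     if "keeper" in p or "goal" in p:
--         return 0
--     if any(k in p for k in ("back", "defender", "sweeper")):
--         return 1
--     if any(k in p for k in ("midfield", "winger")):
--         return 2
--     if any(k in p for k in ("forward", "striker", "centre-forward", "center-forward")):
--         return 3
--     return 2
-- ===== SOURCE B (Python) =====
-- # Flat keyword->code map; result = minimum code among all matching keywords
-- # (codes encode priority: 0 beats 1 beats 2 beats 3), default 2 when nothing matches.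
-- KEYWORD_CODE = {
--     "keeper": 0, "goal": 0,
--     "back": 1, "defender": 1, "sweeper": 1,
--     "midfield": 2, "winger": 2,
--     "forward": 3, "striker": 3, "centre-forward": 3, "center-forward": 3,
-- }
--
-- def role_group_code(position_text: str) -> int:
--     p = (position_text or "").lower()
--     return min((code for kw, code in KEYWORD_CODE.items() if kw in p), default=2)
-- ===== Notes on version B (the rewrite author's own statement) =====
-- stated objective: alternative
-- what changed: Replaces the ordered short-circuit if-chain over keyword groups by an order-independent aggregation: a flat keyword->code map is scanned once and the MINIMUM code among all matching keywords is returned (default 2), which is correct because the codes themselves encode the priority order.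
import Mathlib
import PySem

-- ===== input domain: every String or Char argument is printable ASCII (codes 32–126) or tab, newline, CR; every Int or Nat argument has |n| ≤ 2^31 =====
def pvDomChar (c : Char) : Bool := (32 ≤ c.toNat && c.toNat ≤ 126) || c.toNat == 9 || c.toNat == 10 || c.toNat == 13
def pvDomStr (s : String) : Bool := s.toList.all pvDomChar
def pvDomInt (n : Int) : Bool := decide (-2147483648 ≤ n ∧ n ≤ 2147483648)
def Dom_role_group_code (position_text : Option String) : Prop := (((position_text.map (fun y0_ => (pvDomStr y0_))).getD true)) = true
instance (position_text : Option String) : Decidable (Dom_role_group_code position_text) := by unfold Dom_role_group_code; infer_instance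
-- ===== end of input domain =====

-- B replaces A's ordered if-chain with a flat keyword->code map aggregated by minimum matching code (default 2); objective: alternative, same cost.


-- ===== PORT A =====
-- the body after computing p = (position_text or "").lower()
def pvRoleA (p : String) : Int :=
  if PySem.Str.isIn "keeper" p || PySem.Str.isIn "goal" p then 0
  else if (["back", "defender", "sweeper"].any (fun k => PySem.Str.isIn k p)) then 1
  else if (["midfield", "winger"].any (fun k => PySem.Str.isIn k p)) then 2
  else if (["forward", "striker", "centre-forward", "center-forward"].any (fun k => PySem.Str.isIn k p)) then 3
  else 2

def role_group_code (position_text : Option String) : Int :=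
  pvRoleA (PySem.Str.lower (position_text.getD ""))

-- ===== PORT B =====
-- flat keyword -> code association list (a dict in Source B, iterated in insertion order); codes encode the priority order
def pvKeywordCode : List (String × Int) :=
  [("keeper", 0), ("goal", 0),
   ("back", 1), ("defender", 1), ("sweeper", 1),
   ("midfield", 2), ("winger", 2),
   ("forward", 3), ("striker", 3), ("centre-forward", 3), ("center-forward", 3)]

-- min(generator, default=2): minimum code among matching keywords, 2 if none match
def pvRoleB (p : String) : Int :=
  (((pvKeywordCode.filter (fun kc => PySem.Str.isIn kc.1 p)).map Prod.snd).min?).getD 2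

def role_group_code_alt (position_text : Option String) : Int :=
  pvRoleB (PySem.Str.lower (position_text.getD ""))

-- ===== PRECONDITION & SPEC =====
def Spec_role_group_code (position_text : Option String) (out : Int) : Prop := out = role_group_code_alt position_text
instance (position_text : Option String) (out : Int) : Decidable (Spec_role_group_code position_text out) := by unfold Spec_role_group_code; infer_instance

-- ===== CLAIM (what is proved, stated in full; the proofs are below) =====
def Claim_equal_role_group_code : Prop := ∀ (position_text : Option String), Dom_role_group_code position_text → Spec_role_group_code position_text (role_group_code position_text)

-- ===== LEMMAS AND PROOFS =====

-- B's aggregation equals c whenever some keyword of code c matches and every matching keyword has code >= c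
theorem pv_min_spec (p : String) (c : Int)
    (hmem : ∃ kc ∈ pvKeywordCode, PySem.Str.isIn kc.1 p = true ∧ kc.2 = c)
    (hlb : ∀ kc ∈ pvKeywordCode, PySem.Str.isIn kc.1 p = true → c ≤ kc.2) :
    pvRoleB p = c := by
  obtain ⟨kc, hkc, hin, hc⟩ := hmem
  have hmin : ((pvKeywordCode.filter (fun kc => PySem.Str.isIn kc.1 p)).map Prod.snd).min? = some c := by
    rw [List.min?_eq_some_iff]
    constructor
    · exact List.mem_map.2 ⟨kc, List.mem_filter.2 ⟨hkc, hin⟩, hc⟩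
    · intro b hb
      obtain ⟨kc', hkc', rfl⟩ := List.mem_map.1 hb
      obtain ⟨hmem', hin'⟩ := List.mem_filter.1 hkc'
      exact hlb kc' hmem' hin'
  unfold pvRoleB
  rw [hmin]
  rfl

-- ===== VERDICT (by name: the statement is the Claim_ definition above) =====
theorem role_group_code_spec : Claim_equal_role_group_code := by
  intro position_text _
  unfold Spec_role_group_code role_group_code role_group_code_alt
  generalize PySem.Str.lower (position_text.getD "") = p
  unfold pvRoleA
  split_ifs with h1 h2 h3 h4
  · -- group 0 matches
    refine (pv_min_spec p 0 ?_ ?_).symm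
    · rcases Bool.or_eq_true_iff.1 h1 with h | h
      · exact ⟨("keeper", 0), by simp [pvKeywordCode], h, rfl⟩
      · exact ⟨("goal", 0), by simp [pvKeywordCode], h, rfl⟩
    · intro kc hkc _
      simp only [pvKeywordCode, List.mem_cons, List.not_mem_nil, or_false] at hkc
      rcases hkc with rfl|rfl|rfl|rfl|rfl|rfl|rfl|rfl|rfl|rfl|rfl <;> norm_num
  · -- group 1 matches, group 0 does not
    simp only [Bool.or_eq_true_iff, not_or, Bool.not_eq_true] at h1
    simp only [List.any_eq_true, List.mem_cons, List.not_mem_nil, or_false] at h2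
    refine (pv_min_spec p 1 ?_ ?_).symm
    · obtain ⟨k, hk, hin⟩ := h2
      rcases hk with rfl|rfl|rfl
      · exact ⟨("back", 1), by simp [pvKeywordCode], hin, rfl⟩
      · exact ⟨("defender", 1), by simp [pvKeywordCode], hin, rfl⟩
      · exact ⟨("sweeper", 1), by simp [pvKeywordCode], hin, rfl⟩
    · intro kc hkc hin
      simp only [pvKeywordCode, List.mem_cons, List.not_mem_nil, or_false] at hkc
      rcases hkc with rfl|rfl|rfl|rfl|rfl|rfl|rfl|rfl|rfl|rfl|rfl
      · exact absurd hin (by simpa using h1.1)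
      · exact absurd hin (by simpa using h1.2)
      all_goals norm_num
  · -- group 2 matches, groups 0,1 do not
    simp only [Bool.or_eq_true_iff, not_or, Bool.not_eq_true] at h1
    simp only [List.any_eq_true, not_exists, not_and, Bool.not_eq_true] at h2
    simp only [List.any_eq_true, List.mem_cons, List.not_mem_nil, or_false] at h3
    refine (pv_min_spec p 2 ?_ ?_).symm
    · obtain ⟨k, hk, hin⟩ := h3
      rcases hk with rfl|rfl
      · exact ⟨("midfield", 2), by simp [pvKeywordCode], hin, rfl⟩
      · exact ⟨("winger", 2), by simp [pvKeywordCode], hin, rfl⟩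
    · intro kc hkc hin
      simp only [pvKeywordCode, List.mem_cons, List.not_mem_nil, or_false] at hkc
      rcases hkc with rfl|rfl|rfl|rfl|rfl|rfl|rfl|rfl|rfl|rfl|rfl
      · exact absurd hin (by simpa using h1.1)
      · exact absurd hin (by simpa using h1.2)
      · exact absurd hin (by simpa using h2 "back" (by simp))
      · exact absurd hin (by simpa using h2 "defender" (by simp))
      · exact absurd hin (by simpa using h2 "sweeper" (by simp))
      all_goals norm_num
  · -- group 3 matches, groups 0,1,2 do not
    simp only [Bool.or_eq_true_iff, not_or, Bool.not_eq_true] at h1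
    simp only [List.any_eq_true, not_exists, not_and, Bool.not_eq_true] at h2 h3
    simp only [List.any_eq_true, List.mem_cons, List.not_mem_nil, or_false] at h4
    refine (pv_min_spec p 3 ?_ ?_).symm
    · obtain ⟨k, hk, hin⟩ := h4
      rcases hk with rfl|rfl|rfl|rfl
      · exact ⟨("forward", 3), by simp [pvKeywordCode], hin, rfl⟩
      · exact ⟨("striker", 3), by simp [pvKeywordCode], hin, rfl⟩
      · exact ⟨("centre-forward", 3), by simp [pvKeywordCode], hin, rfl⟩
      · exact ⟨("center-forward", 3), by simp [pvKeywordCode], hin, rfl⟩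
    · intro kc hkc hin
      simp only [pvKeywordCode, List.mem_cons, List.not_mem_nil, or_false] at hkc
      rcases hkc with rfl|rfl|rfl|rfl|rfl|rfl|rfl|rfl|rfl|rfl|rfl
      · exact absurd hin (by simpa using h1.1)
      · exact absurd hin (by simpa using h1.2)
      · exact absurd hin (by simpa using h2 "back" (by simp))
      · exact absurd hin (by simpa using h2 "defender" (by simp))
      · exact absurd hin (by simpa using h2 "sweeper" (by simp))
      · exact absurd hin (by simpa using h3 "midfield" (by simp))
      · exact absurd hin (by simpa using h3 "winger" (by simp))
      all_goals norm_num
  · -- nothing matches: the filtered list is empty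
    simp only [Bool.or_eq_true_iff, not_or, Bool.not_eq_true] at h1
    simp only [List.any_eq_true, not_exists, not_and, Bool.not_eq_true] at h2 h3 h4
    have hnil : pvKeywordCode.filter (fun kc => PySem.Str.isIn kc.1 p) = [] := by
      rw [List.filter_eq_nil_iff]
      intro kc hkc
      simp only [pvKeywordCode, List.mem_cons, List.not_mem_nil, or_false] at hkc
      rcases hkc with rfl|rfl|rfl|rfl|rfl|rfl|rfl|rfl|rfl|rfl|rfl
      · simpa using h1.1
      · simpa using h1.2
      · simpa using h2 "back" (by simp)
      · simpa using h2 "defender" (by simp)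
      · simpa using h2 "sweeper" (by simp)
      · simpa using h3 "midfield" (by simp)
      · simpa using h3 "winger" (by simp)
      · simpa using h4 "forward" (by simp)
      · simpa using h4 "striker" (by simp)
      · simpa using h4 "centre-forward" (by simp)
      · simpa using h4 "center-forward" (by simp)
    unfold pvRoleB
    rw [hnil]
    rfl
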